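-- pv_equiv track=rewrite | github.com/DingChiLin/AlgorithmSampleCode | DynamicProgramming/String/NumberOfUniqueGoodSubsequences.py | numberOfUniqueGoodSubsequences
-- ===== SOURCE A (Python) =====
-- from collections import defaultdict
--
-- MOD = int(1e9+7)
--
-- def numberOfUniqueGoodSubsequences(binary: str) -> int:
--     N = len(binary)
--     dp = [0] * (N+1)
--     records = defaultdict(int)
--
--     hasZero = False
--     for i in range(1, N+1):
--         if binary[i-1] == '0':
--             hasZero = True
--         dp[i] = dp[i-1] * 2 + (1 if binary[i-1] == '1' else 0)
--         if binary[i-1] in records: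
--             index = records[binary[i-1]]
--             dp[i] -= (dp[index-1] + (1 if binary[i-1] == '1' else 0))
--         dp[i] %= MOD
--         records[binary[i-1]] = i
--
--     return dp[N] + (1 if hasZero else 0)
-- ===== SOURCE B (Python) =====
-- MOD = int(1e9+7)
--
-- def numberOfUniqueGoodSubsequences(binary: str) -> int:
--     # Classic "distinct subsequences by last character" DP: ends[c] is the number of
--     # distinct subsequences (counted as '1'-led, i.e. good without leading zero) that
--     # end in character c. Appending c turns every counted subsequence, plus the empty
--     # one when c == '1', into one ending in c; no indices, no dp array, no subtraction.
--     ends = {}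
--     for c in binary:
--         ends[c] = (sum(ends.values()) + (1 if c == '1' else 0)) % MOD
--     return sum(ends.values()) % MOD + (1 if '0' in binary else 0)
-- ===== Notes on version B (the rewrite author's own statement) =====
-- stated objective: alternative
-- what changed: Replaced A's positional dp array with the inclusion-exclusion subtraction at each character's recorded last index by the classic ends-with-c DP: a dict mapping each character to the count of distinct ('1'-led) subsequences ending in it, updated as ends[c] = sum(ends.values()) + (c=='1'), with no indices, no dp array and no subtraction; dropping the per-step array writes and index bookkeeping also measured ~2x faster at large n.
import Mathlib
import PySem

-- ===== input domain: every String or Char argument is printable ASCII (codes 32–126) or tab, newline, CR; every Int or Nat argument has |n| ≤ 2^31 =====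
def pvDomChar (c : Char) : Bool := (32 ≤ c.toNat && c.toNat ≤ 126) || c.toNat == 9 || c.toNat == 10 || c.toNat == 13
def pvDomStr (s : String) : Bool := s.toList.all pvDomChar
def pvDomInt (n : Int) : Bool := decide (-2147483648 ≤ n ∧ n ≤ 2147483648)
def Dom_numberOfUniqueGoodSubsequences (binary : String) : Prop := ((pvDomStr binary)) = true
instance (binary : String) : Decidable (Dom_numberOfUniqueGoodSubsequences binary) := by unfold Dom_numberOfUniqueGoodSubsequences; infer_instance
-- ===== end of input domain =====

-- B replaces A's positional dp array plus last-occurrence index records (with its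
-- inclusion-exclusion subtraction) by the classic ends-with-c DP: a dict of counts of
-- distinct subsequences ending in each character (objective: alternative, same O(n) pass).

def pvMOD : Int := 1000000007

-- ===== PORT A =====
-- one loop iteration of A (s = binary as a char list; state = (dp, records, hasZero))
def pvStepA (s : List Char) (st : List Int × PySem.Dict Char Int × Bool) (i : Nat) :
    List Int × PySem.Dict Char Int × Bool :=
  let dp := st.1
  let records := st.2.1
  let hasZero := st.2.2
  let c := s.getD (i - 1) ' '
  let hasZero := if c = '0' then true else hasZero
  let one : Int := if c = '1' then 1 else 0
  let v := dp.getD (i - 1) 0 * 2 + one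
  let v := match PySem.Dict.get? records c with
    | some idx => v - (dp.getD (idx.toNat - 1) 0 + one)
    | none => v
  let v := PySem.Int.mod v pvMOD
  (dp.set i v, PySem.Dict.insert records c (Int.ofNat i), hasZero)

def numberOfUniqueGoodSubsequences (binary : String) : Int :=
  let s := binary.toList
  let N := s.length
  let st := (List.range' 1 N).foldl (pvStepA s)
    (List.replicate (N + 1) 0, PySem.Dict.empty, false)
  st.1.getD N 0 + (if st.2.2 then 1 else 0)

-- ===== PORT B =====
-- one loop iteration of B: ends[c] = (sum(ends.values()) + (1 if c == '1' else 0)) % MOD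
def pvStepB (ed : PySem.Dict Char Int) (c : Char) : PySem.Dict Char Int :=
  ed.insert c (PySem.Int.mod (ed.values.sum + (if c = '1' then 1 else 0)) pvMOD)

def numberOfUniqueGoodSubsequences_alt (binary : String) : Int :=
  let ed := binary.toList.foldl pvStepB PySem.Dict.empty
  PySem.Int.mod (ed.values.sum) pvMOD + (if PySem.Str.isIn "0" binary then (1 : Int) else 0)

-- ===== PRECONDITION & SPEC =====
def Spec_numberOfUniqueGoodSubsequences (binary : String) (out : Int) : Prop := out = numberOfUniqueGoodSubsequences_alt binary
instance (binary : String) (out : Int) : Decidable (Spec_numberOfUniqueGoodSubsequences binary out) := by unfold Spec_numberOfUniqueGoodSubsequences; infer_instance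

-- ===== CLAIM (what is proved, stated in full; the proofs are below) =====
def Claim_equal_numberOfUniqueGoodSubsequences : Prop := ∀ (binary : String), Dom_numberOfUniqueGoodSubsequences binary → Spec_numberOfUniqueGoodSubsequences binary (numberOfUniqueGoodSubsequences binary)

-- ===== LEMMAS AND PROOFS =====

-- the value B's dict stores for a character, as a function of A's state:
-- records[c] = j  ↦  ends[c] = (dp[j-1] + (1 if c == '1' else 0)) % MOD
def pvF (dp : List Int) (p : Char × Int) : Char × Int :=
  (p.1, PySem.Int.mod (dp.getD (p.2.toNat - 1) 0 + (if p.1 = '1' then 1 else 0)) pvMOD)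

theorem pv_getD_set_ne (dp : List Int) (m n : Nat) (v : Int) (h : n ≠ m) :
    (dp.set m v).getD n 0 = dp.getD n 0 := by
  simp [List.getD_eq_getElem?_getD, List.getElem?_set_ne (by omega : m ≠ n)]

-- replacing the (unique) entry keyed c in an association list changes the value sum by v - w
theorem pvSumMapReplace : ∀ (l : List (Char × Int)) (c : Char) (v w : Int),
    (l.map Prod.fst).Nodup → (c, w) ∈ l →
    ((l.map (fun p => if p.1 == c then (c, v) else p)).map Prod.snd).sum
      = (l.map Prod.snd).sum - w + v := by
  intro l
  induction l with
  | nil => intro c v w _ h; cases h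
  | cons p t ih =>
    intro c v w hnd hmem
    simp only [List.map_cons, List.nodup_cons] at hnd
    rcases List.mem_cons.1 hmem with h | h
    · have hpc : p.1 = c := by rw [← h]
      have htid : t.map (fun q => if q.1 == c then (c, v) else q) = t := by
        rw [List.map_congr_left (g := id), List.map_id]
        intro q hq
        have : q.1 ≠ c := by
          intro hqc
          exact hnd.1 (hpc ▸ hqc ▸ List.mem_map_of_mem hq)
        simp [this]
      simp only [List.map_cons, beq_self_eq_true, if_true, htid, List.sum_cons, ← h]
      ring
    · have hpc : p.1 ≠ c := by
        intro hqc
        exact hnd.1 (hqc ▸ (List.mem_map_of_mem h : (c, w).1 ∈ t.map Prod.fst))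
      have hif : (if (p.1 == c) = true then (c, v) else p) = p := by simp [hpc]
      rw [List.map_cons, hif, List.map_cons, List.map_cons, List.sum_cons, List.sum_cons,
        ih c v w hnd.2 h]
      ring

theorem pv_sum_values_insert (d : PySem.Dict Char Int) (c : Char) (v : Int)
    (hnd : d.keys.Nodup) :
    ((d.insert c v).values).sum = d.values.sum - d.getD c 0 + v := by
  by_cases hcon : d.contains c = true
  · cases hg : d.get? c with
    | none =>
      rw [(PySem.Dict.get?_eq_none_iff_contains _ _).1 hg] at hcon
      cases hcon
    | some w =>
      have hmem : (c, w) ∈ d.items := PySem.Dict.mem_items_of_get?_eq_some _ hg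
      have hgd : d.getD c 0 = w := PySem.Dict.getD_of_get?_eq_some _ 0 hg
      simp only [PySem.Dict.values, PySem.Dict.items_insert_of_contains _ _ hcon, hgd]
      exact pvSumMapReplace d.items c v w hnd hmem
  · have hcon' : d.contains c = false := by simpa using hcon
    simp only [PySem.Dict.values, PySem.Dict.items_insert_of_not_contains _ _ hcon',
      List.map_append, List.sum_append, PySem.Dict.getD_of_not_contains _ _ hcon']
    simp

theorem pv_loop (rest : List Char) : ∀ (s : List Char) (k : Nat) (dp : List Int)
    (rec : PySem.Dict Char Int) (hz : Bool) (ed : PySem.Dict Char Int),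
    s.length = k + rest.length →
    dp.length = s.length + 1 →
    rest = s.drop k →
    rec.keys.Nodup →
    ed.items = rec.items.map (pvF dp) →
    PySem.Int.mod (ed.values.sum) pvMOD = dp.getD k 0 →
    (∀ p ∈ rec.items, ∃ j : Nat, p.2 = (j : Int) ∧ 1 ≤ j ∧ j ≤ k) →
    (((List.range' (k + 1) rest.length).foldl (pvStepA s) (dp, rec, hz)).1.getD s.length 0
        = PySem.Int.mod ((rest.foldl pvStepB ed).values.sum) pvMOD) ∧
    (((List.range' (k + 1) rest.length).foldl (pvStepA s) (dp, rec, hz)).2.2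
        = (hz || rest.any (· == '0'))) := by
  induction rest with
  | nil =>
    intro s k dp rec hz ed hlen hdplen hdrop hnd hitems hS hb
    simp only [List.length_nil, Nat.add_zero] at hlen
    constructor
    · simpa [List.range', hlen] using hS.symm
    · simp
  | cons c rest ih =>
    intro s k dp rec hz ed hlen hdplen hdrop hnd hitems hS hb
    have hM : (0 : Int) < pvMOD := by norm_num [pvMOD]
    have hk : k < s.length := by simp at hlen; omega
    have hck : s[k]? = some c := by
      have := congrArg (fun l => l.head?) hdrop
      simpa [List.head?_drop] using this.symm
    have hcget : s.getD k ' ' = c := by simp [List.getD_eq_getElem?_getD, hck]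
    have hklt : k + 1 < dp.length := by simp at hlen; omega
    -- keys of ed coincide with keys of rec
    have hkeys : ed.keys = rec.keys := by
      simp only [PySem.Dict.keys, hitems, List.map_map]
      exact List.map_congr_left (fun p _ => rfl)
    have hndEd : ed.keys.Nodup := hkeys ▸ hnd
    -- peel one iteration off each fold
    rw [List.length_cons, List.range'_succ, List.foldl_cons, List.foldl_cons]
    set x : Int := if c = '1' then 1 else 0 with hxdef
    set S : Int := ed.values.sum with hSdef
    set vB : Int := PySem.Int.mod (S + x) pvMOD with hvBdef
    set vA : Int := PySem.Int.mod (match PySem.Dict.get? rec c with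
      | some idx => dp.getD k 0 * 2 + x - (dp.getD (idx.toNat - 1) 0 + x)
      | none => dp.getD k 0 * 2 + x) pvMOD with hvAdef
    have hA : pvStepA s (dp, rec, hz) (k + 1)
        = (dp.set (k + 1) vA, rec.insert c (Int.ofNat (k + 1)),
           (if c = '0' then true else hz)) := by
      simp only [pvStepA, hcget, Nat.add_sub_cancel, hvAdef, hxdef]
    have hB : pvStepB ed c = ed.insert c vB := by
      simp only [pvStepB, hvBdef, hSdef, hxdef]
    rw [hA, hB]
    -- the new B value equals (dp[k] + x) % MOD
    have hvB' : vB = PySem.Int.mod (dp.getD k 0 + x) pvMOD := by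
      rw [hvBdef, PySem.Int.mod_eq_emod_of_pos hM, PySem.Int.mod_eq_emod_of_pos hM]
      rw [PySem.Int.mod_eq_emod_of_pos hM] at hS
      rw [← hS]
      have : pvMOD = 1000000007 := rfl
      rw [this] at *
      omega
    have := ih s (k + 1) (dp.set (k + 1) vA) (rec.insert c (Int.ofNat (k + 1)))
        (if c = '0' then true else hz) (ed.insert c vB)
        (by simp at hlen ⊢; omega)
        (by simp [hdplen])
        (by rw [← List.tail_drop, ← hdrop]; rfl)
        (PySem.Dict.nodup_keys_insert _ _ _ hnd)
        ?_ ?_ ?_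
    · refine ⟨this.1, ?_⟩
      rw [this.2]
      cases hz <;> by_cases hc : c = '0' <;> simp [hc]
    · -- items invariant after one step
      by_cases hcon : rec.contains c = true
      · have hedcon : ed.contains c = true := by
          rw [PySem.Dict.contains_eq_decide_mem_keys, hkeys,
            ← PySem.Dict.contains_eq_decide_mem_keys]; exact hcon
        rw [PySem.Dict.items_insert_of_contains _ _ hedcon,
          PySem.Dict.items_insert_of_contains _ _ hcon, hitems, List.map_map, List.map_map]
        apply List.map_congr_left
        intro p hp
        obtain ⟨j, hj, hj1, hjk⟩ := hb p hp
        by_cases hpc : p.1 = c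
        · simp only [Function.comp, pvF, hpc, beq_self_eq_true, if_true]
          have : (Int.ofNat (k + 1)).toNat - 1 = k := by simp
          rw [this, pv_getD_set_ne dp (k + 1) k vA (by omega), ← hxdef, ← hvB']
        · simp only [Function.comp, pvF, beq_iff_eq, if_neg hpc]
          rw [hj, Int.toNat_natCast, pv_getD_set_ne dp (k + 1) (j - 1) vA (by omega)]
      · have hcon' : rec.contains c = false := by simpa using hcon
        have hedcon : ed.contains c = false := by
          rw [PySem.Dict.contains_eq_decide_mem_keys, hkeys,
            ← PySem.Dict.contains_eq_decide_mem_keys]; exact hcon'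
        rw [PySem.Dict.items_insert_of_not_contains _ _ hedcon,
          PySem.Dict.items_insert_of_not_contains _ _ hcon', hitems, List.map_append]
        congr 1
        · apply List.map_congr_left
          intro p hp
          obtain ⟨j, hj, hj1, hjk⟩ := hb p hp
          simp only [pvF]
          rw [hj, Int.toNat_natCast, pv_getD_set_ne dp (k + 1) (j - 1) vA (by omega)]
        · simp only [List.map_cons, List.map_nil, pvF]
          have : (Int.ofNat (k + 1)).toNat - 1 = k := by simp
          rw [this, pv_getD_set_ne dp (k + 1) k vA (by omega), ← hxdef, ← hvB']
      -- sum invariant after one step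
    · rw [pv_sum_values_insert ed c vB hndEd, ← hSdef,
        List.getD_eq_getElem?_getD, List.getElem?_set_self hklt]
      simp only [Option.getD_some]
      rw [PySem.Int.mod_eq_emod_of_pos hM] at hS
      cases hg : rec.get? c with
      | some idx =>
        have hmem : (c, idx) ∈ rec.items := PySem.Dict.mem_items_of_get?_eq_some _ hg
        obtain ⟨j, hj, hj1, hjk⟩ := hb (c, idx) hmem
        have hmem' : (c, PySem.Int.mod (dp.getD (idx.toNat - 1) 0 + x) pvMOD) ∈ ed.items := by
          rw [hitems]
          have := List.mem_map_of_mem (f := pvF dp) hmem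
          simpa [pvF, ← hxdef] using this
        have hgd : ed.getD c 0 = PySem.Int.mod (dp.getD (idx.toNat - 1) 0 + x) pvMOD :=
          PySem.Dict.getD_of_mem_items _ hmem' hndEd 0
        have hvA : vA = (dp.getD k 0 * 2 + x - (dp.getD (idx.toNat - 1) 0 + x)) % pvMOD := by
          rw [hvAdef, hg, PySem.Int.mod_eq_emod_of_pos hM]
        rw [hgd, hvA, hvBdef, PySem.Int.mod_eq_emod_of_pos hM, PySem.Int.mod_eq_emod_of_pos hM,
          PySem.Int.mod_eq_emod_of_pos hM]
        have hMn : pvMOD = 1000000007 := rfl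
        rw [hMn] at hS ⊢
        omega
      | none =>
        have hcon' : rec.contains c = false := (PySem.Dict.get?_eq_none_iff_contains _ _).1 hg
        have hedcon : ed.contains c = false := by
          rw [PySem.Dict.contains_eq_decide_mem_keys, hkeys,
            ← PySem.Dict.contains_eq_decide_mem_keys]; exact hcon'
        have hvA : vA = (dp.getD k 0 * 2 + x) % pvMOD := by
          rw [hvAdef, hg, PySem.Int.mod_eq_emod_of_pos hM]
        rw [PySem.Dict.getD_of_not_contains _ _ hedcon, hvA, hvBdef,
          PySem.Int.mod_eq_emod_of_pos hM, PySem.Int.mod_eq_emod_of_pos hM]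
        have hMn : pvMOD = 1000000007 := rfl
        rw [hMn] at hS ⊢
        omega
      -- index bounds after one step
    · intro p hp
      rw [PySem.Dict.mem_items_insert _ _ _ _] at hp
      rcases hp with h | ⟨hmem, _⟩
      · exact ⟨k + 1, by simp [h], by omega, by omega⟩
      · obtain ⟨j, hj, hj1, hjk⟩ := hb p hmem
        exact ⟨j, hj, hj1, by omega⟩

theorem pv_isIn_zero (binary : String) :
    PySem.Str.isIn "0" binary = binary.toList.any (· == '0') := by
  rw [Bool.eq_iff_iff, PySem.Str.isIn_iff_infix, List.any_eq_true]
  constructor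
  · intro h
    have hm : '0' ∈ binary.toList := (List.singleton_sublist).1 (by simpa using h.sublist)
    exact ⟨'0', hm, rfl⟩
  · rintro ⟨a, ha, hb⟩
    have hA : a = '0' := by simpa using hb
    subst hA
    obtain ⟨l1, l2, hsp⟩ := List.append_of_mem ha
    exact ⟨l1, l2, by simp [hsp]⟩

-- ===== VERDICT (by name: the statement is the Claim_ definition above) =====
theorem numberOfUniqueGoodSubsequences_spec : Claim_equal_numberOfUniqueGoodSubsequences := by
  intro binary _
  show numberOfUniqueGoodSubsequences binary = numberOfUniqueGoodSubsequences_alt binary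
  have h := pv_loop binary.toList binary.toList 0
      (List.replicate (binary.toList.length + 1) 0) PySem.Dict.empty false PySem.Dict.empty
      (by simp) (by simp) (by simp)
      (by rw [show (PySem.Dict.empty : PySem.Dict Char Int).keys = [] from rfl]; exact List.nodup_nil)
      (by rfl)
      (by rw [show ((PySem.Dict.empty : PySem.Dict Char Int).values) = [] from rfl]; simp [PySem.Int.mod, List.getD_eq_getElem?_getD])
      (by intro p hp; rw [show (PySem.Dict.empty : PySem.Dict Char Int).items = [] from rfl] at hp; cases hp)
  simp only [Nat.zero_add, Bool.false_or] at h
  simp only [numberOfUniqueGoodSubsequences, numberOfUniqueGoodSubsequences_alt, pv_isIn_zero]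
  rw [h.1, h.2]
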